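-- pv_equiv track=rewrite | github.com/KetchupOnWaffles/sudokuGenerator | verif.py | verif_line
-- ===== SOURCE A (Python) =====
-- def verif_line(line):
--     for i in line:
--         count = 1
--         count2 = 0
--         for j in range(9):
--             for k in i:
--                 if k == count:
--                     count2 +=1
--             if count2 > 1:
--                 return True
--             count+=1
--             count2 = 0
--             if count == 10:
--                 count = 1
--     return False
-- ===== SOURCE B (Python) =====
-- def verif_line(line):
--     for sub in line:
--         seen = set()
--         for k in sub:
--             if 1 <= k <= 9:
--                 if k in seen:
--                     return True
--                 seen.add(k)
--     return False
-- ===== Notes on version B (the rewrite author's own statement) =====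
-- stated objective: simpler
-- what changed: Replaces A's per-sublist rescan for each digit value 1..9 (counting occurrences of each) by a single pass per sublist that keeps a 'seen' set and returns True on the first repeated digit.
import Mathlib
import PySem

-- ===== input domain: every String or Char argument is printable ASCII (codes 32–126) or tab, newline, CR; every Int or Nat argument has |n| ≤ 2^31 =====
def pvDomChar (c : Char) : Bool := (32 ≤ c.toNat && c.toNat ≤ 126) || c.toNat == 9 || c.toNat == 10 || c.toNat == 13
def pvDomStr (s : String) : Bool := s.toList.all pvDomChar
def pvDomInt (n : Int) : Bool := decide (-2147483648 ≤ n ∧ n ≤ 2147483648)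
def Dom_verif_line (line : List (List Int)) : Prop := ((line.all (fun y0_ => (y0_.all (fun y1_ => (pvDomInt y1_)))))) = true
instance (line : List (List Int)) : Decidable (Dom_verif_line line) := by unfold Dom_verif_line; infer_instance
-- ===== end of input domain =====

-- B replaces A's nine per-digit rescans of each sublist by one pass with a 'seen' set (simpler, single scan per sublist).

-- ===== PORT A =====
-- inner 'for k in i: if k == count: count2 += 1' loop
def countEq (i : List Int) (c : Int) : Int :=
  i.foldl (fun acc k => if k == c then acc + 1 else acc) 0

-- 'for j in range(9)' loop with early return, state = count
def verifA_go (i : List Int) : Nat → Int → Bool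
  | 0, _ => false
  | n + 1, count =>
    if countEq i count > 1 then true
    else
      let c := count + 1
      verifA_go i n (if c == 10 then 1 else c)

def verif_line : List (List Int) → Bool
  | [] => false
  | i :: rest => if verifA_go i 9 1 then true else verif_line rest

-- ===== PORT B =====
-- one pass over the sublist, maintaining the 'seen' set
def verifB_scan : List Int → PySem.Set Int → Bool
  | [], _ => false
  | k :: ks, seen =>
    if 1 ≤ k ∧ k ≤ 9 then
      if PySem.Set.contains seen k then true
      else verifB_scan ks (PySem.Set.add seen k)
    else verifB_scan ks seen

def verif_line_alt : List (List Int) → Bool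
  | [] => false
  | sub :: rest =>
    if verifB_scan sub PySem.Set.empty then true else verif_line_alt rest

-- ===== PRECONDITION & SPEC =====
def Spec_verif_line (line : List (List Int)) (out : Bool) : Prop := out = verif_line_alt line
instance (line : List (List Int)) (out : Bool) : Decidable (Spec_verif_line line out) := by unfold Spec_verif_line; infer_instance

-- ===== CLAIM (what is proved, stated in full; the proofs are below) =====
def Claim_equal_verif_line : Prop := ∀ (line : List (List Int)), Dom_verif_line line → Spec_verif_line line (verif_line line)

-- ===== LEMMAS AND PROOFS =====

lemma countEq_foldl (i : List Int) (c : Int) (acc : Int) :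
    i.foldl (fun acc k => if k == c then acc + 1 else acc) acc = acc + (i.count c : Int) := by
  induction i generalizing acc with
  | nil => simp
  | cons k ks ih =>
    simp only [List.foldl_cons, List.count_cons, ih]
    by_cases h : k = c <;> simp [h] <;> ring

lemma countEq_gt_one (i : List Int) (c : Int) : (countEq i c > 1) ↔ 2 ≤ i.count c := by
  simp only [countEq, countEq_foldl, zero_add]
  omega

lemma go_succ (i : List Int) (n : Nat) (count : Int) :
    verifA_go i (n + 1) count =
      if countEq i count > 1 then true
      else verifA_go i n (if count + 1 == 10 then 1 else count + 1) := rfl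

lemma aInner_iff (i : List Int) :
    verifA_go i 9 1 = true ↔ ∃ k : Int, 1 ≤ k ∧ k ≤ 9 ∧ 2 ≤ i.count k := by
  show verifA_go i (8+1) 1 = true ↔ _
  rw [go_succ]; norm_num
  show _ ∨ verifA_go i (7+1) 2 = true ↔ _
  rw [go_succ]; norm_num
  show _ ∨ _ ∨ verifA_go i (6+1) 3 = true ↔ _
  rw [go_succ]; norm_num
  show _ ∨ _ ∨ _ ∨ verifA_go i (5+1) 4 = true ↔ _
  rw [go_succ]; norm_num
  show _ ∨ _ ∨ _ ∨ _ ∨ verifA_go i (4+1) 5 = true ↔ _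
  rw [go_succ]; norm_num
  show _ ∨ _ ∨ _ ∨ _ ∨ _ ∨ verifA_go i (3+1) 6 = true ↔ _
  rw [go_succ]; norm_num
  show _ ∨ _ ∨ _ ∨ _ ∨ _ ∨ _ ∨ verifA_go i (2+1) 7 = true ↔ _
  rw [go_succ]; norm_num
  show _ ∨ _ ∨ _ ∨ _ ∨ _ ∨ _ ∨ _ ∨ verifA_go i (1+1) 8 = true ↔ _
  rw [go_succ]; norm_num
  show _ ∨ _ ∨ _ ∨ _ ∨ _ ∨ _ ∨ _ ∨ _ ∨ verifA_go i (0+1) 9 = true ↔ _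
  rw [go_succ]; norm_num
  show _ ∨ _ ∨ _ ∨ _ ∨ _ ∨ _ ∨ _ ∨ _ ∨ _ ∨ verifA_go i 0 1 = true ↔ _
  simp only [verifA_go, countEq_gt_one, Bool.false_eq_true, or_false]
  constructor
  · rintro (h | h | h | h | h | h | h | h | h)
    · exact ⟨1, by norm_num, by norm_num, h⟩
    · exact ⟨2, by norm_num, by norm_num, h⟩
    · exact ⟨3, by norm_num, by norm_num, h⟩
    · exact ⟨4, by norm_num, by norm_num, h⟩
    · exact ⟨5, by norm_num, by norm_num, h⟩
    · exact ⟨6, by norm_num, by norm_num, h⟩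
    · exact ⟨7, by norm_num, by norm_num, h⟩
    · exact ⟨8, by norm_num, by norm_num, h⟩
    · exact ⟨9, by norm_num, by norm_num, h⟩
  · rintro ⟨k, h1, h9, hc⟩
    interval_cases k <;> tauto

lemma scan_iff (l : List Int) (seen : PySem.Set Int) :
    verifB_scan l seen = true ↔
      ∃ k ∈ l, 1 ≤ k ∧ k ≤ 9 ∧ (k ∈ seen ∨ 2 ≤ l.count k) := by
  induction l generalizing seen with
  | nil => simp [verifB_scan]
  | cons k ks ih =>
    by_cases hd : 1 ≤ k ∧ k ≤ 9
    · by_cases hm : k ∈ seen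
      · have : verifB_scan (k :: ks) seen = true := by
          simp only [verifB_scan, hd, and_self, if_true]
          rw [(PySem.Set.contains_iff ..).mpr hm]
          rfl
        simp only [this, true_iff]
        exact ⟨k, by simp, hd.1, hd.2, Or.inl hm⟩
      · have hstep : verifB_scan (k :: ks) seen = verifB_scan ks (PySem.Set.add seen k) := by
          simp only [verifB_scan, hd, and_self, if_true]
          rw [if_neg (fun h => hm ((PySem.Set.contains_iff ..).mp h))]
        rw [hstep, ih]
        constructor
        · rintro ⟨j, hj, h1, h9, hor⟩
          rcases hor with hsj | hcnt
          · rcases (PySem.Set.mem_add ..).mp hsj with hs | rfl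
            · exact ⟨j, List.mem_cons_of_mem _ hj, h1, h9, Or.inl hs⟩
            · refine ⟨j, List.mem_cons_self .., h1, h9, Or.inr ?_⟩
              have : 1 ≤ ks.count j := List.count_pos_iff.mpr hj
              rw [List.count_cons_self]
              omega
          · refine ⟨j, List.mem_cons_of_mem _ hj, h1, h9, Or.inr ?_⟩
            simp only [List.count_cons]
            split <;> omega
        · rintro ⟨j, hj, h1, h9, hor⟩
          by_cases hjk : j = k
          · subst hjk
            rcases hor with hs | hcnt
            · exact absurd hs hm
            · have hks : 1 ≤ ks.count j := by
                rw [List.count_cons_self] at hcnt; omega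
              refine ⟨j, List.count_pos_iff.mp hks, h1, h9, ?_⟩
              exact Or.inl ((PySem.Set.mem_add ..).mpr (Or.inr rfl))
          · have hj' : j ∈ ks := by
              rcases List.mem_cons.mp hj with h | h
              · exact absurd h hjk
              · exact h
            refine ⟨j, hj', h1, h9, ?_⟩
            rcases hor with hs | hcnt
            · exact Or.inl ((PySem.Set.mem_add ..).mpr (Or.inl hs))
            · refine Or.inr ?_
              simp only [List.count_cons] at hcnt
              simpa [beq_iff_eq, Ne.symm hjk] using hcnt
    · have hstep : verifB_scan (k :: ks) seen = verifB_scan ks seen := by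
        simp [verifB_scan, hd]
      rw [hstep, ih]
      constructor
      · rintro ⟨j, hj, h1, h9, hor⟩
        refine ⟨j, List.mem_cons_of_mem _ hj, h1, h9, ?_⟩
        rcases hor with hs | hcnt
        · exact Or.inl hs
        · refine Or.inr ?_
          simp only [List.count_cons]
          split <;> omega
      · rintro ⟨j, hj, h1, h9, hor⟩
        have hjk : j ≠ k := by rintro rfl; exact hd ⟨h1, h9⟩
        have hj' : j ∈ ks := by
          rcases List.mem_cons.mp hj with h | h
          · exact absurd h hjk
          · exact h
        refine ⟨j, hj', h1, h9, ?_⟩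
        rcases hor with hs | hcnt
        · exact Or.inl hs
        · refine Or.inr ?_
          simp only [List.count_cons] at hcnt
          simpa [beq_iff_eq, Ne.symm hjk] using hcnt

lemma inner_eq (i : List Int) : verifA_go i 9 1 = verifB_scan i PySem.Set.empty := by
  rw [Bool.eq_iff_iff, aInner_iff, scan_iff]
  constructor
  · rintro ⟨k, h1, h9, hc⟩
    exact ⟨k, List.count_pos_iff.mp (by omega), h1, h9, Or.inr hc⟩
  · rintro ⟨k, hk, h1, h9, hor⟩
    rcases hor with hs | hc
    · simp [PySem.Set.empty] at hs
    · exact ⟨k, h1, h9, hc⟩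

-- ===== VERDICT (by name: the statement is the Claim_ definition above) =====
lemma lines_eq (line : List (List Int)) : verif_line line = verif_line_alt line := by
  induction line with
  | nil => rfl
  | cons i rest ih =>
    show (if verifA_go i 9 1 then true else verif_line rest) =
         (if verifB_scan i PySem.Set.empty then true else verif_line_alt rest)
    rw [inner_eq, ih]

theorem verif_line_spec : Claim_equal_verif_line := fun line _ => lines_eq line
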